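-- pv_equiv track=rewrite | github.com/Mohammed-BENHAMMOUTE/Competitve-programming- | E_Decode.py | solve
-- ===== SOURCE A (Python) =====
-- def solve(s):
--     MOD = 10**9 + 7
--     n = len(s)
--     prefix_sum = 0
--     sum_count = {0: 1}  # Initialize with 0 having count 1
--     answer = 0
--
--     for char in s:
--         if char == '1':
--             prefix_sum += 1
--         else:
--             prefix_sum -= 1
--
--         # If we've seen this sum before, it means we have a balanced substring
--         if prefix_sum in sum_count:
--             answer += sum_count[prefix_sum]
--
--         # Increment the count for this sum
--         sum_count[prefix_sum] = sum_count.get(prefix_sum, 0) + 1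
--
--     return answer % MOD
-- ===== SOURCE B (Python) =====
-- def solve(s):
--     MOD = 10**9 + 7
--     prefix = 0
--     ps = [0]
--     for ch in s:
--         prefix += 1 if ch == '1' else -1
--         ps.append(prefix)
--     ps.sort()
--     answer = 0
--     run = 1
--     prev = ps[0]
--     for x in ps[1:]:
--         if x == prev:
--             run += 1
--         else:
--             run = 1
--         answer += run - 1
--         prev = x
--     return answer % MOD
-- ===== Notes on version B (the rewrite author's own statement) =====
-- stated objective: alternative
-- what changed: Replaces the hash-map prefix-sum counter with sort-then-scan: build the list of all prefix sums, sort it, and count pairs of equal values by scanning runs of equal adjacent elements (answer += run-1), returning the same pair count mod 1e9+7.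
import Mathlib
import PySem

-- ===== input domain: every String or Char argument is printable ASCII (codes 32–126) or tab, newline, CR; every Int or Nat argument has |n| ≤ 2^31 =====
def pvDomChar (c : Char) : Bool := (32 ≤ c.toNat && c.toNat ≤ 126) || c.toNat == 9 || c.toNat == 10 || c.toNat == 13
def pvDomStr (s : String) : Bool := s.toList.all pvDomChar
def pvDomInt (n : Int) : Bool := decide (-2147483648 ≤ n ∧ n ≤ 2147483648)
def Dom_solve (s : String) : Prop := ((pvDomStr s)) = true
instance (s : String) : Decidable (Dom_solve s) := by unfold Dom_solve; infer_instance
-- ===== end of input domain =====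

-- B replaces A's hash-map counter with sort-then-scan over the list of prefix sums
-- (alternative decomposition; both count pairs of equal prefix sums).

-- ===== PORT A =====
-- one loop step of A: state is (prefix_sum, sum_count, answer)
def solveStepA (st : Int × PySem.Dict Int Int × Int) (ch : Char) : Int × PySem.Dict Int Int × Int :=
  let p := if ch == '1' then st.1 + 1 else st.1 - 1
  let a := if st.2.1.contains p then st.2.2 + st.2.1.getD p 0 else st.2.2
  (p, st.2.1.insert p (st.2.1.getD p 0 + 1), a)

def solve (s : String) : Int :=
  let MOD : Int := 10 ^ 9 + 7
  let st := s.toList.foldl solveStepA (0, PySem.Dict.ofList [((0 : Int), (1 : Int))], 0)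
  PySem.Int.mod st.2.2 MOD

-- ===== PORT B =====
-- first B loop: build the list of prefix sums (state = (prefix, ps), ps.append(prefix))
def pvBuild (st : Int × List Int) (ch : Char) : Int × List Int :=
  let p := st.1 + (if ch == '1' then 1 else -1)
  (p, st.2 ++ [p])

-- second B loop: scan the sorted list counting runs (state = (prev, run, answer))
def pvScan (st : Int × Int × Int) (x : Int) : Int × Int × Int :=
  let run := if x == st.1 then st.2.1 + 1 else 1
  (x, run, st.2.2 + (run - 1))

def solve_alt (s : String) : Int :=
  let MOD : Int := 10 ^ 9 + 7
  let ps := (s.toList.foldl pvBuild (0, [(0 : Int)])).2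
  let m := PySem.List.sorted ps (fun x => x) false
  let st := (PySem.List.slice m (some 1) none).foldl pvScan (PySem.List.pyGetD m 0 0, 1, 0)
  PySem.Int.mod st.2.2 MOD

-- ===== PRECONDITION & SPEC =====
def Spec_solve (s : String) (out : Int) : Prop := out = solve_alt s
instance (s : String) (out : Int) : Decidable (Spec_solve s out) := by unfold Spec_solve; infer_instance

-- ===== CLAIM (what is proved, stated in full; the proofs are below) =====
def Claim_equal_solve : Prop := ∀ (s : String), Dom_solve s → Spec_solve s (solve s)

-- ===== LEMMAS AND PROOFS =====

-- the list of prefix sums of a character list, starting from p (excluding p itself)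
def pvPref (p : Int) : List Char → List Int
  | [] => []
  | c :: cs =>
    let p' := if c == '1' then p + 1 else p - 1
    p' :: pvPref p' cs

-- number of pairs of equal values: each element pairs with the earlier occurrences,
-- 'seen' is the multiset of earlier values
def pvF (seen : Multiset Int) : List Int → Int
  | [] => 0
  | x :: t => (seen.count x : Int) + pvF (x ::ₘ seen) t

theorem pvF_perm {l₁ l₂ : List Int} (h : l₁.Perm l₂) :
    ∀ seen : Multiset Int, pvF seen l₁ = pvF seen l₂ := by
  induction h with
  | nil => intro seen; rfl
  | cons x _ ih => intro seen; simp [pvF, ih]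
  | swap a b t =>
    intro seen
    simp only [pvF]
    rw [Multiset.cons_swap]
    by_cases hab : b = a
    · subst hab; ring
    · rw [Multiset.count_cons_of_ne hab]
      have hcnt : Multiset.count a (b ::ₘ seen) = Multiset.count a seen := by
        rw [Multiset.count_cons_of_ne (fun e => hab e.symm)]
      rw [hcnt]; ring
  | trans _ _ ih₁ ih₂ => intro seen; rw [ih₁, ih₂]

-- A-side dict invariant: d is the counter of the multiset 'seen'
def pvInv (d : PySem.Dict Int Int) (seen : Multiset Int) : Prop :=
  ∀ k : Int, d.getD k 0 = (seen.count k : Int) ∧ (d.contains k = true ↔ k ∈ seen)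

theorem pvInv_insert (d : PySem.Dict Int Int) (seen : Multiset Int) (p : Int)
    (h : pvInv d seen) : pvInv (d.insert p (d.getD p 0 + 1)) (p ::ₘ seen) := by
  intro k
  constructor
  · rw [PySem.Dict.getD_insert]
    by_cases hk : k = p
    · subst hk
      rw [if_pos rfl, (h k).1, Multiset.count_cons_self]
      push_cast; ring
    · rw [if_neg hk, (h k).1, Multiset.count_cons_of_ne hk]
  · rw [PySem.Dict.contains_insert]
    simp only [Bool.or_eq_true, beq_iff_eq, Multiset.mem_cons]
    rw [(h k).2]

theorem pvA_answer (d : PySem.Dict Int Int) (seen : Multiset Int) (hp : pvInv d seen) (p a : Int) :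
    (if d.contains p then a + d.getD p 0 else a) = a + (seen.count p : Int) := by
  by_cases hc : d.contains p = true
  · rw [if_pos hc, (hp p).1]
  · have hnot : p ∉ seen := fun hm => hc ((hp p).2.mpr hm)
    rw [if_neg hc, Multiset.count_eq_zero_of_notMem hnot]
    simp

-- main A-loop invariant
theorem pvA_loop (l : List Char) : ∀ (p a : Int) (d : PySem.Dict Int Int) (seen : Multiset Int),
    pvInv d seen →
    (l.foldl solveStepA (p, d, a)).2.2 = a + pvF seen (pvPref p l) := by
  induction l with
  | nil => intro p a d seen _; simp [pvPref, pvF]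
  | cons c l ih =>
    intro p a d seen hinv
    simp only [List.foldl_cons, pvPref, pvF]
    have hstep : solveStepA (p, d, a) c
        = ((if c == '1' then p + 1 else p - 1),
           d.insert (if c == '1' then p + 1 else p - 1)
             (d.getD (if c == '1' then p + 1 else p - 1) 0 + 1),
           a + (seen.count (if c == '1' then p + 1 else p - 1) : Int)) := by
      show (_, _, (if d.contains (if c == '1' then p + 1 else p - 1)
          then a + d.getD (if c == '1' then p + 1 else p - 1) 0 else a)) = _
      rw [pvA_answer d seen hinv]
    rw [hstep, ih _ _ _ _ (pvInv_insert d seen _ hinv)]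
    ring

-- B's first loop builds p-prefixed prefix sums
theorem pvBuild_eq (l : List Char) : ∀ (p : Int) (acc : List Int),
    (l.foldl pvBuild (p, acc)).2 = acc ++ pvPref p l := by
  induction l with
  | nil => intro p acc; simp [pvPref]
  | cons c l ih =>
    intro p acc
    have h1 : (if c == '1' then p + 1 else p - 1) = p + (if c == '1' then 1 else -1) := by
      split <;> ring
    simp only [List.foldl_cons, pvBuild, pvPref, ih, List.append_assoc, List.singleton_append, h1]

-- B's scan over a sorted tail computes pvF
theorem pvScan_eq (l : List Int) : ∀ (seen : Multiset Int) (prev run acc : Int),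
    l.Pairwise (· ≤ ·) → (∀ y ∈ seen, y ≤ prev) → (∀ x ∈ l, prev ≤ x) →
    (seen.count prev : Int) = run →
    (l.foldl pvScan (prev, run, acc)).2.2 = acc + pvF seen l := by
  induction l with
  | nil => intro seen prev run acc _ _ _ _; simp [pvF]
  | cons x t ih =>
    intro seen prev run acc hpw hseen hge hcnt
    have hpx : prev ≤ x := hge x (List.mem_cons_self)
    have hpw' := (List.pairwise_cons.mp hpw).2
    have hxt : ∀ z ∈ t, x ≤ z := (List.pairwise_cons.mp hpw).1
    simp only [List.foldl_cons, pvF]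
    by_cases hx : x = prev
    · subst hx
      have hstep : pvScan (x, run, acc) x = (x, run + 1, acc + run) := by
        simp [pvScan]
      rw [hstep, ih (x ::ₘ seen) x (run + 1) (acc + run) hpw'
            (by intro y hy
                rcases Multiset.mem_cons.mp hy with h | h
                · simp [h]
                · exact hseen y h)
            hxt
            (by rw [Multiset.count_cons_self]; push_cast; omega)]
      rw [← hcnt]; ring
    · have hlt : prev < x := lt_of_le_of_ne hpx (fun e => hx e.symm)
      have hnot : x ∉ seen := fun hm => absurd (hseen x hm) (not_le.mpr hlt)
      have hstep : pvScan (prev, run, acc) x = (x, 1, acc) := by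
        simp [pvScan, hx]
      rw [hstep, ih (x ::ₘ seen) x 1 acc hpw'
            (by intro y hy
                rcases Multiset.mem_cons.mp hy with h | h
                · simp [h]
                · exact le_of_lt (lt_of_le_of_lt (hseen y h) hlt))
            hxt
            (by rw [Multiset.count_cons_self, Multiset.count_eq_zero_of_notMem hnot]; simp)]
      rw [Multiset.count_eq_zero_of_notMem hnot]
      simp

-- the initial dict of A is the counter of {0}
theorem pvInv_init : pvInv (PySem.Dict.ofList [((0 : Int), (1 : Int))]) {0} := by
  intro k
  by_cases hk : k = 0
  · subst hk
    refine ⟨by decide, by decide, fun _ => by decide⟩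
  · have hkeys : (PySem.Dict.ofList [((0 : Int), (1 : Int))]).keys = [0] := rfl
    have hc : (PySem.Dict.ofList [((0 : Int), (1 : Int))]).contains k = false := by
      simp [pysem, hkeys, hk]
    refine ⟨?_, ?_⟩
    · rw [PySem.Dict.getD_of_not_contains _ _ hc,
          Multiset.count_eq_zero_of_notMem (by simp [hk])]
      rfl
    · constructor
      · intro hct; rw [hc] at hct; cases hct
      · intro hm; exact absurd (Multiset.mem_singleton.mp hm) hk

-- ===== VERDICT (by name: the statement is the Claim_ definition above) =====
theorem solve_spec : Claim_equal_solve := by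
  intro s _
  unfold Spec_solve solve solve_alt
  simp only []
  set l := s.toList with hl
  -- A's answer
  rw [pvA_loop l 0 0 _ {0} pvInv_init]
  -- B's prefix-sum list
  have hps : (l.foldl pvBuild (0, [(0 : Int)])).2 = 0 :: pvPref 0 l := by
    rw [pvBuild_eq]; rfl
  rw [hps]
  -- the sorted list is nonempty
  have hperm : (PySem.List.sorted (0 :: pvPref 0 l) (fun x => x) false).Perm (0 :: pvPref 0 l) :=
    PySem.List.sorted_perm _ _ _
  have hpw : (PySem.List.sorted (0 :: pvPref 0 l) (fun x => x) false).Pairwise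
      (fun a b : Int => a ≤ b) := PySem.List.sorted_pairwise _ _
  rcases hm : PySem.List.sorted (0 :: pvPref 0 l) (fun x => x) false with _ | ⟨h, t⟩
  · exact absurd ((PySem.List.sorted_eq_nil_iff _ _ _).mp hm) (by simp)
  · rw [hm] at hperm hpw
    have hpwc := List.pairwise_cons.mp hpw
    rw [PySem.List.slice_from_one, PySem.List.pyGetD_zero_cons]
    show PySem.Int.mod (0 + pvF {0} (pvPref 0 l)) _
       = PySem.Int.mod ((t.foldl pvScan (h, 1, 0)).2.2) _
    rw [pvScan_eq t {h} h 1 0 hpwc.2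
          (by intro y hy; rw [Multiset.mem_singleton.mp hy])
          hpwc.1
          (by rw [Multiset.count_singleton_self]; rfl)]
    have : pvF ({h} : Multiset Int) t = pvF (0 : Multiset Int) (h :: t) := by
      simp [pvF]
    rw [this, pvF_perm hperm]
    simp [pvF]
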